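-- pv_equiv track=rewrite | github.com/Drayhar/LEPL1401-INFO-1 | Mission 04/carre.py | carre
-- ===== SOURCE A (Python) =====
-- def carre(n):
--     list = []
--     big_list = []
--     for j in range(n):
--         for i in range(n):
--             list.append(i + j * n)
--         big_list.append(list)
--         list = []
--     return big_list
-- ===== SOURCE B (Python) =====
-- def carre(n):
--     if n <= 0:
--         return []
--     flat = list(range(n * n))
--     return [flat[j * n:(j + 1) * n] for j in range(n)]
-- ===== Notes on version B (the rewrite author's own statement) =====
-- stated objective: alternative
-- what changed: Replaces the nested per-cell loops computing i + j*n with one flat pass generating range(n*n) once, then partitioning it into rows by slicing consecutive n-length chunks.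
import Mathlib
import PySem

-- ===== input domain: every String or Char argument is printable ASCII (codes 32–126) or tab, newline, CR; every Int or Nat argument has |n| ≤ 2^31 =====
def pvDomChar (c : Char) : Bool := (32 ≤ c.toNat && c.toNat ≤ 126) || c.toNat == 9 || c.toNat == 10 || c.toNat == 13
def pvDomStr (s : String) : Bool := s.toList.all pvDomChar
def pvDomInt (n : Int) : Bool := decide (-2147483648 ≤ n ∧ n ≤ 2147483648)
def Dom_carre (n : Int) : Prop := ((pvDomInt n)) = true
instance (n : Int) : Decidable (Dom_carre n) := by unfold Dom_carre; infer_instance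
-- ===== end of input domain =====

-- B builds the flat sequence range(n*n) once and slices it into n-length row chunks,
-- instead of A's nested loops computing i + j*n per cell (objective: alternative decomposition).


-- ===== PORT A =====
-- for j in range(n): for i in range(n): list.append(i + j*n); big_list.append(list); list = []
def carre (n : Int) : List (List Int) :=
  (PySem.List.pyRange 0 n 1).foldl
    (fun big_list j =>
      big_list ++ [(PySem.List.pyRange 0 n 1).foldl (fun l i => l ++ [i + j * n]) []])
    []

-- ===== PORT B =====
-- if n <= 0: return []; flat = list(range(n*n)); [flat[j*n:(j+1)*n] for j in range(n)]
def carre_alt (n : Int) : List (List Int) :=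
  if n ≤ 0 then []
  else
    let flat := PySem.List.pyRange 0 (n * n) 1
    (PySem.List.pyRange 0 n 1).map
      (fun j => PySem.List.slice flat (some (j * n)) (some ((j + 1) * n)))

-- ===== PRECONDITION & SPEC =====
def Spec_carre (n : Int) (out : List (List Int)) : Prop := out = carre_alt n
instance (n : Int) (out : List (List Int)) : Decidable (Spec_carre n out) := by unfold Spec_carre; infer_instance

-- ===== CLAIM (what is proved, stated in full; the proofs are below) =====
def Claim_equal_carre : Prop := ∀ (n : Int), Dom_carre n → Spec_carre n (carre n)

-- ===== LEMMAS AND PROOFS =====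

-- a slice of a 0-based range with in-range bounds is the corresponding sub-range
theorem slice_pyRange_zero (c a b : Int) (ha : 0 ≤ a) (hab : a ≤ b) (hbc : b ≤ c) :
    PySem.List.slice (PySem.List.pyRange 0 c 1) (some a) (some b) = PySem.List.pyRange a b 1 := by
  rw [PySem.List.slice_toNat _ ha (le_trans ha hab)]
  rw [PySem.List.pyRange_one_append 0 a c ha (le_trans hab hbc)]
  have hlen : (PySem.List.pyRange 0 a 1).length = a.toNat := by
    rw [PySem.List.length_pyRange_one]; omega
  rw [← hlen, List.drop_left]
  rw [PySem.List.pyRange_one_append a b c hab hbc]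
  have hlen2 : (PySem.List.pyRange a b 1).length = b.toNat - a.toNat := by
    rw [PySem.List.length_pyRange_one]; omega
  rw [hlen, ← hlen2, List.take_left]

theorem carre_eq_alt (n : Int) : carre n = carre_alt n := by
  unfold carre carre_alt
  by_cases hn : n ≤ 0
  · simp [hn, PySem.List.pyRange_one_eq_nil hn]
  simp only [hn, if_false]
  rw [PySem.List.foldl_append_singleton_eq_map]
  simp only [List.nil_append]
  apply List.map_congr_left
  intro j hj
  rw [PySem.List.mem_pyRange_one] at hj
  rw [PySem.List.foldl_append_singleton_eq_map, List.nil_append]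
  rw [slice_pyRange_zero (n * n) (j * n) ((j + 1) * n) (by nlinarith [hj.1, hj.2])
    (by nlinarith [hj.1, hj.2]) (by nlinarith [hj.1, hj.2])]
  rw [PySem.List.pyRange_one, PySem.List.pyRange_one, List.map_map]
  have : ((j + 1) * n - j * n).toNat = (n - 0).toNat := by
    have : (j + 1) * n - j * n = n := by ring
    rw [this]; omega
  rw [this]
  apply List.map_congr_left
  intro k _
  simp [Function.comp]
  ring

-- ===== VERDICT (by name: the statement is the Claim_ definition above) =====
theorem carre_spec : Claim_equal_carre := by
  intro n _
  unfold Spec_carre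
  exact carre_eq_alt n
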